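-- pv_equiv track=rewrite | github.com/Abercus/devianceminingthesis | DevianceMiningPipeline/declaretemplates_data.py | template_alternate_response_data
-- ===== SOURCE A (Python) =====
-- def template_alternate_response_data(trace, event_set):
--     """
--     If there is A, it has to be eventually followed by B.
--     Alternate: there cant be any further A until first next B
--     :param trace:
--     :param event_set:
--     :return:
--     """
--
--     # exactly 2 event
--     assert (len(event_set) == 2)
--
--     fulfillments = []
--     violations = []
--
--     event_1 = event_set[0]
--     event_2 = event_set[1]
--     if event_1 in trace:
--         if event_2 in trace:
--             # Go through two lists, one by one
--             # first events pos must be before 2nd lists first pos etc...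
--             # A -> A -> B -> A -> B
--
--             event_1_positions = trace[event_1]
--             event_2_positions = trace[event_2]
--             # FOR every EVENT 2: Going before in the log: THERE MUST BE EVENT 1 BEFORE EVENT 2!
--             # Keep track of largest event_1_pos before current event_2_pos. Sorting array.
--             merged = []
--             event_1_ind = 0
--             event_2_ind = 0
--             while event_1_ind < len(event_1_positions) and event_2_ind < len(event_2_positions):
--                 if event_1_positions[event_1_ind] < event_2_positions[event_2_ind]:
--                     merged.append((1, event_1_positions[event_1_ind]))
--                     event_1_ind += 1
--                 else:
--                     merged.append((2, event_2_positions[event_2_ind]))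
--                     event_2_ind += 1
--
--             # Merge leftovers
--             while event_1_ind < len(event_1_positions):
--                 merged.append((1, event_1_positions[event_1_ind]))
--                 event_1_ind += 1
--
--             while event_2_ind < len(event_2_positions):
--                 merged.append((2, event_2_positions[event_2_ind]))
--                 event_2_ind += 1
--
--
--             # Go through array, at every point check if (2, x). If 2, then check if next is 2 or 1.
--             for i in range(len(merged)):
--                 if merged[i][0] == 1:
--                     if i == len(merged) - 1:
--                         # Last in list! Will not be responded! Violated.
--                         violations.append(merged[i][1])
--                     elif merged[i+1][0] == 2:
--                         # If no violation is not same, then no violation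
--                         fulfillments.append(merged[i][1])
--                     else:
--                         # Therefore if previous is same... then violation
--                         violations.append(merged[i][1])
--
--             if len(violations) > 0:
--                 return -1, False, fulfillments, violations
--             else:
--                 return len(fulfillments), False, fulfillments, violations
--
--         else:
--             # impossible because there has to be at least one event2 with event1. Therefore all activations are violated
--             return -1, False, [], trace[event_1]
--
--     return 0, True, [], []  # todo: vacuity condition!!
-- ===== SOURCE B (Python) =====
-- def template_alternate_response_data(trace, event_set):
--     assert (len(event_set) == 2)
--     event_1, event_2 = event_set
--     if event_1 not in trace:
--         return 0, True, [], []
--     if event_2 not in trace: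
--         return -1, False, [], trace[event_1]
--     a = trace[event_1]
--     b = trace[event_2]
--     fulfillments = []
--     violations = []
--     j = 0
--     n = len(a)
--     for i in range(n):
--         p = a[i]
--         # advance past every b-position the merge would emit before p
--         while j < len(b) and b[j] <= p:
--             j += 1
--         if j < len(b) and (i + 1 == n or b[j] <= a[i + 1]):
--             fulfillments.append(p)
--         else:
--             violations.append(p)
--     if len(violations) > 0:
--         return -1, False, fulfillments, violations
--     return len(fulfillments), False, fulfillments, violations
-- ===== Notes on version B (the rewrite author's own statement) =====
-- stated objective: simpler
-- what changed: B drops A's intermediate tagged merged list and its second lookahead scan: a single pass over event_1's positions with a pointer advanced through event_2's positions classifies each activation directly.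
import Mathlib
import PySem

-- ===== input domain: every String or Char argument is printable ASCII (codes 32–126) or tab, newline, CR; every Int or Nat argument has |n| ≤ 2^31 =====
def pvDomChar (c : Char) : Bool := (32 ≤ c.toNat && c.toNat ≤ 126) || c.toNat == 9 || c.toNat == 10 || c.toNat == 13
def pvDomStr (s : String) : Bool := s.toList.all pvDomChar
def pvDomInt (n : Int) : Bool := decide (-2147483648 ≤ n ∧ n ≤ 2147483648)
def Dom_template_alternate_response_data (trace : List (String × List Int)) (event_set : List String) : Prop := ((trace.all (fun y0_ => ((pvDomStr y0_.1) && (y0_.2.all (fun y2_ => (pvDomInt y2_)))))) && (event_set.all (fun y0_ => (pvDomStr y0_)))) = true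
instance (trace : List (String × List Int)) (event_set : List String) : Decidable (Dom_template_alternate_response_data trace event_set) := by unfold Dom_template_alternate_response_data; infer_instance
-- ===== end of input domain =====

-- B drops A's intermediate tagged merged list and its second scan: one pass over
-- event_1's positions with a pointer into event_2's positions classifies each
-- activation directly (objective: simpler — no intermediate list, one pass).

-- ===== PORT A =====
-- the two merge while-loops plus the two leftover while-loops of A
def pvMergeA : List Int → List Int → List (Int × Int)
  | [], bs => bs.map (fun x => (2, x))
  | a :: as, [] => (a :: as).map (fun x => (1, x))
  | a :: as, b :: bs =>
    if a < b then (1, a) :: pvMergeA as (b :: bs)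
    else (2, b) :: pvMergeA (a :: as) bs

-- A's 'for i in range(len(merged))' pass with its lookahead at merged[i+1]
def pvScanA : List (Int × Int) → List Int × List Int
  | [] => ([], [])
  | [(t, p)] => if t = 1 then ([], [p]) else ([], [])
  | (t, p) :: (t2, p2) :: rest =>
    let fv := pvScanA ((t2, p2) :: rest)
    if t = 1 then
      if t2 = 2 then (p :: fv.1, fv.2) else (fv.1, p :: fv.2)
    else fv

def template_alternate_response_data (trace : List (String × List Int)) (event_set : List String) : Int × Bool × List Int × List Int :=
  let d := PySem.Dict.mk trace
  let event_1 := (PySem.List.pyGet? event_set 0).getD ""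
  let event_2 := (PySem.List.pyGet? event_set 1).getD ""
  match d.get? event_1 with
  | none => (0, true, [], [])
  | some pos1 =>
    match d.get? event_2 with
    | none => (-1, false, [], pos1)
    | some pos2 =>
      let fv := pvScanA (pvMergeA pos1 pos2)
      if fv.2.length > 0 then (-1, false, fv.1, fv.2)
      else ((fv.1.length : Int), false, fv.1, fv.2)

-- ===== PORT B =====
-- B's single loop over a with pointer j into b (the inner while is dropWhile)
def pvLoopB : List Int → List Int → List Int × List Int
  | [], _ => ([], [])
  | p :: as, bs =>
    let bs' := bs.dropWhile (fun x => x ≤ p)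
    let ok : Bool :=
      match bs' with
      | [] => false
      | q :: _ => match as with | [] => true | p2 :: _ => decide (q ≤ p2)
    let fv := pvLoopB as bs'
    if ok then (p :: fv.1, fv.2) else (fv.1, p :: fv.2)

def template_alternate_response_data_alt (trace : List (String × List Int)) (event_set : List String) : Int × Bool × List Int × List Int :=
  let d := PySem.Dict.mk trace
  let event_1 := (PySem.List.pyGet? event_set 0).getD ""
  let event_2 := (PySem.List.pyGet? event_set 1).getD ""
  match d.get? event_1 with
  | none => (0, true, [], [])
  | some pos1 =>
    match d.get? event_2 with
    | none => (-1, false, [], pos1)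
    | some pos2 =>
      let fv := pvLoopB pos1 pos2
      if fv.2.length > 0 then (-1, false, fv.1, fv.2)
      else ((fv.1.length : Int), false, fv.1, fv.2)

-- ===== PRECONDITION & SPEC =====
-- Pre_ excludes exactly the inputs where A's 'assert len(event_set) == 2' raises AssertionError
def Pre_template_alternate_response_data (trace : List (String × List Int)) (event_set : List String) : Prop := event_set.length = 2
instance (trace : List (String × List Int)) (event_set : List String) : Decidable (Pre_template_alternate_response_data trace event_set) := by unfold Pre_template_alternate_response_data; infer_instance

def pvWitness_template_alternate_response_data : (List (String × List Int)) × List String := ([("a", [1, 4]), ("b", [2])], ["a", "b"])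

def Spec_template_alternate_response_data (trace : List (String × List Int)) (event_set : List String) (out : Int × Bool × List Int × List Int) : Prop := out = template_alternate_response_data_alt trace event_set
instance (trace : List (String × List Int)) (event_set : List String) (out : Int × Bool × List Int × List Int) : Decidable (Spec_template_alternate_response_data trace event_set out) := by unfold Spec_template_alternate_response_data; infer_instance

-- ===== CLAIM (what is proved, stated in full; the proofs are below) =====
def Claim_equal_template_alternate_response_data : Prop := ∀ (trace : List (String × List Int)) (event_set : List String), Dom_template_alternate_response_data trace event_set → Pre_template_alternate_response_data trace event_set → Spec_template_alternate_response_data trace event_set (template_alternate_response_data trace event_set)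

-- ===== LEMMAS AND PROOFS =====

-- a leading (2, _) entry contributes nothing to A's scan
lemma scanA_cons2 (q : Int) (l : List (Int × Int)) : pvScanA ((2, q) :: l) = pvScanA l := by
  cases l with
  | nil => simp [pvScanA]
  | cons h t => cases h; simp [pvScanA]

-- a list of only 2-tags scans to nothing
lemma scanA_map2 (bs : List Int) : pvScanA (bs.map (fun x => ((2 : Int), x))) = ([], []) := by
  induction bs with
  | nil => simp [pvScanA]
  | cons b bs ih => simpa [scanA_cons2] using ih

-- a nonempty list of only 1-tags scans to all-violations
lemma scanA_map1 (a : Int) (as : List Int) :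
    pvScanA ((1, a) :: as.map (fun x => ((1 : Int), x))) = ([], a :: as) := by
  induction as generalizing a with
  | nil => simp [pvScanA]
  | cons a2 as ih => simp [pvScanA, ih a2]

-- B with an exhausted pointer: every remaining activation is a violation
lemma loopB_nil_b (as : List Int) : pvLoopB as [] = ([], as) := by
  induction as with
  | nil => simp [pvLoopB]
  | cons p as ih => simp [pvLoopB, ih]

-- B ignores pointer entries that the merge would already have consumed
lemma loopB_drop (p q : Int) (as bs : List Int) (h : q ≤ p) :
    pvLoopB (p :: as) (q :: bs) = pvLoopB (p :: as) bs := by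
  simp [pvLoopB, List.dropWhile, h]

-- the key invariant: scanning A's merged list equals B's fused single pass
lemma scan_merge_eq_loop (a b : List Int) : pvScanA (pvMergeA a b) = pvLoopB a b := by
  induction a generalizing b with
  | nil =>
    cases b with
    | nil => simp [pvMergeA, pvLoopB, pvScanA]
    | cons q bs => simp [pvMergeA, pvLoopB, scanA_cons2, scanA_map2]
  | cons p as iha =>
    induction b with
    | nil => simp [pvMergeA, loopB_nil_b, scanA_map1]  -- merge of (p::as) with [] is all 1-tags
    | cons q bs ihb =>
      by_cases h : p < q
      · have hq : ¬ q ≤ p := not_le.mpr h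
        rw [show pvMergeA (p :: as) (q :: bs) = (1, p) :: pvMergeA as (q :: bs) by
          simp [pvMergeA, h]]
        cases as with
        | nil =>
          simp [pvMergeA, pvScanA, scanA_cons2, scanA_map2, pvLoopB, List.dropWhile, hq]
        | cons p2 as' =>
          by_cases h2 : p2 < q
          · have hq2 : ¬ q ≤ p2 := not_le.mpr h2
            rw [show pvMergeA (p2 :: as') (q :: bs) = (1, p2) :: pvMergeA as' (q :: bs) by
              simp [pvMergeA, h2]]
            have := iha (q :: bs)
            rw [show pvMergeA (p2 :: as') (q :: bs) = (1, p2) :: pvMergeA as' (q :: bs) by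
              simp [pvMergeA, h2]] at this
            simp [pvScanA, pvLoopB, List.dropWhile, hq, hq2, this]
          · have hq2 : q ≤ p2 := not_lt.mp h2
            rw [show pvMergeA (p2 :: as') (q :: bs) = (2, q) :: pvMergeA (p2 :: as') bs by
              simp [pvMergeA, h2]]
            have := iha (q :: bs)
            rw [show pvMergeA (p2 :: as') (q :: bs) = (2, q) :: pvMergeA (p2 :: as') bs by
              simp [pvMergeA, h2]] at this
            simp [pvScanA, pvLoopB, List.dropWhile, hq, hq2, this]
      · have hq : q ≤ p := not_lt.mp h
        rw [show pvMergeA (p :: as) (q :: bs) = (2, q) :: pvMergeA (p :: as) bs by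
          simp [pvMergeA, h]]
        rw [scanA_cons2, ihb, loopB_drop p q as bs hq]

-- ===== VERDICT (by name: the statement is the Claim_ definition above) =====
theorem template_alternate_response_data_spec : Claim_equal_template_alternate_response_data := by
  intro trace event_set _ _
  unfold Spec_template_alternate_response_data
  simp only [template_alternate_response_data, template_alternate_response_data_alt,
    scan_merge_eq_loop]
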